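-- pv_equiv track=rewrite | github.com/jamesmilliman/rook_moves | rook_moves.py | find_max_moves
-- ===== SOURCE A (Python) =====
-- def dfs(board, x, y, visited):
--     visited[y][x] = True
--     counts = 0
--     for j in range(len(board)):
--         if j != y and board[j][x] and not visited[j][x]:
--             counts += dfs(board, x, j, visited)
--
--     for i in range(len(board[y])):
--         if i != x and board[y][i] and not visited[y][i]:
--             counts += dfs(board, i, y, visited)
--     return counts + 1
--
-- def clear_board(board, visited):
--     for y in range(len(board)):
--         for x in range(len(board[y])):
--             if visited[y][x]:
--                 board[y][x] = False
--
-- def find_max_moves(board):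
--     count = 0
--     for y in range(len(board)):
--         for x in range(len(board[y])):
--             if board[y][x]:
--                 visited = [[False for _ in range(len(board[j]))] for j in range(len(board))]
--                 count += dfs(board, x, y, visited) - 1
--                 clear_board(board, visited)
--
--     return count
-- ===== SOURCE B (Python) =====
-- def find_max_moves(board):
--     rooks = [(y, x) for y, row in enumerate(board) for x, v in enumerate(row) if v]
--     remaining = list(rooks)
--     components = 0
--     while remaining:
--         comp = [remaining[0]]
--         for _ in range(len(remaining)):
--             new = [q for q in remaining
--                    if q not in comp and any(q[0] == p[0] or q[1] == p[1] for p in comp)]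
--             if not new:
--                 break
--             comp += new
--         remaining = [q for q in remaining if q not in comp]
--         components += 1
--     return len(rooks) - components
-- ===== Notes on version B (the rewrite author's own statement) =====
-- stated objective: alternative
-- what changed: A runs a recursive DFS with a visited matrix per component and wipes the component off the board; B lists the rook coordinates once, then repeatedly grows a component by iterative set expansion (no recursion, no board mutation) and returns total_rooks - number_of_components.
import Mathlib
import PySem

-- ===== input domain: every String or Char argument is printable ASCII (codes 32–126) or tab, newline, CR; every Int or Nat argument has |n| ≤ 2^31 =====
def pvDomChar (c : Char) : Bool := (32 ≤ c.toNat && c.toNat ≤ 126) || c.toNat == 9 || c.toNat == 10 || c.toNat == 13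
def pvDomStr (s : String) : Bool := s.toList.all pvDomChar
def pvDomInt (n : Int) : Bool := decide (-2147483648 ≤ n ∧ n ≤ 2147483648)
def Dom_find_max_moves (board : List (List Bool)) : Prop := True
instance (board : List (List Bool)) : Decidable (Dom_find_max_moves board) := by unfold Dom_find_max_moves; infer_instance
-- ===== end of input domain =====

-- B replaces A's recursive DFS + per-component board wipe by one pass collecting rook coordinates
-- and an iterative set-expansion component count (objective: alternative).  Note: Python A clears
-- `board` in place; the equivalence proved here is about the RETURN value only (B does not mutate).

-- ===== PORT A =====
-- Indexing: Python raises IndexError on out-of-range board[j][x]; exactly those inputs are excluded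
-- by Pre_find_max_moves, and there `pvCell` renders the (never-claimed) access as `false`.
-- `fuel` is a totality guard only (pvCells+1 is never exhausted); Python has no such bound.
def pvCell (m : List (List Bool)) (p : Nat × Nat) : Bool := (m.getD p.1 []).getD p.2 false

def pvMark (m : List (List Bool)) (p : Nat × Nat) : List (List Bool) :=
  m.modify p.1 (fun row => row.set p.2 true)

def pvCells (m : List (List Bool)) : Nat := (m.map List.length).sum

def dfsA (fuel : Nat) (b : List (List Bool)) (x y : Nat) (V : List (List Bool)) :
    Int × List (List Bool) :=
  match fuel with
  | 0 => (0, V)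
  | f+1 =>
    let V1 := pvMark V (y, x)
    let s1 := (List.range b.length).foldl (fun (st : Int × List (List Bool)) j =>
        if j ≠ y ∧ pvCell b (j, x) = true ∧ pvCell st.2 (j, x) = false then
          let r := dfsA f b x j st.2
          (st.1 + r.1, r.2)
        else st) ((0 : Int), V1)
    let s2 := (List.range (b.getD y []).length).foldl (fun (st : Int × List (List Bool)) i =>
        if i ≠ x ∧ pvCell b (y, i) = true ∧ pvCell st.2 (y, i) = false then
          let r := dfsA f b i y st.2
          (st.1 + r.1, r.2)
        else st) s1
    (s2.1 + 1, s2.2)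

def clearRowStep (V : List (List Bool)) (y : Nat) (bc : List (List Bool)) (x : Nat) :
    List (List Bool) :=
  if pvCell V (y, x) = true then bc.modify y (fun row => row.set x false) else bc

def clearYStep (V : List (List Bool)) (bc : List (List Bool)) (y : Nat) : List (List Bool) :=
  (List.range ((bc.getD y []).length)).foldl (clearRowStep V y) bc

def clearA (b V : List (List Bool)) : List (List Bool) :=
  (List.range b.length).foldl (clearYStep V) b

def find_max_moves (board : List (List Bool)) : Int :=
  ((List.range board.length).foldl (fun (st : Int × List (List Bool)) y =>
      (List.range ((st.2.getD y []).length)).foldl (fun (st2 : Int × List (List Bool)) x =>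
        if pvCell st2.2 (y, x) = true then
          let visited := st2.2.map (fun row => row.map (fun _ => false))
          let r := dfsA (pvCells st2.2 + 1) st2.2 x y visited
          (st2.1 + r.1 - 1, clearA st2.2 r.2)
        else st2) st) ((0 : Int), board)).1

-- ===== PORT B =====
def pvAdjB (p q : Nat × Nat) : Bool := p.1 == q.1 || p.2 == q.2

def rooksOf (board : List (List Bool)) : List (Nat × Nat) :=
  (List.range board.length).flatMap (fun y =>
    (List.range ((board.getD y []).length)).filterMap (fun x =>
      if pvCell board (y, x) = true then some (y, x) else none))

def expandB (remaining comp : List (Nat × Nat)) : List (Nat × Nat) :=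
  remaining.filter (fun q => !comp.contains q && comp.any (fun p => pvAdjB p q))

def closeGo : Nat → List (Nat × Nat) → List (Nat × Nat) → List (Nat × Nat)
  | 0, _, comp => comp
  | f+1, remaining, comp =>
    let nw := expandB remaining comp
    if nw = [] then comp else closeGo f remaining (comp ++ nw)

-- termination helpers for bLoop (cited in decreasing_by)
theorem mem_closeGo_of_mem (f : Nat) (rem comp : List (Nat × Nat)) (a : Nat × Nat)
    (h : a ∈ comp) : a ∈ closeGo f rem comp := by
  induction f generalizing comp with
  | zero => simpa [closeGo]
  | succ f ih =>
    simp only [closeGo]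
    split
    · exact h
    · exact ih _ (List.mem_append_left _ h)

theorem pv_filter_length_lt {l : List (Nat × Nat)} {p : Nat × Nat → Bool} {a : Nat × Nat}
    (ha : a ∈ l) (hpa : p a = false) : (l.filter p).length < l.length := by
  induction l with
  | nil => cases ha
  | cons b t ih =>
    rcases List.mem_cons.1 ha with rfl | hat
    · simp only [List.filter_cons, hpa]
      exact Nat.lt_succ_of_le (List.length_filter_le _ _)
    · by_cases hb : p b = true
      · simpa [List.filter_cons, hb] using ih hat
      · simp only [List.filter_cons, Bool.not_eq_true] at *
        simp only [hb]
        exact Nat.lt_succ_of_lt (ih hat)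

def bLoop : List (Nat × Nat) → Nat → Nat
  | [], k => k
  | r :: rest, k =>
    let comp := closeGo (r :: rest).length (r :: rest) [r]
    bLoop ((r :: rest).filter (fun q => !comp.contains q)) (k + 1)
  termination_by l _ => l.length
  decreasing_by
    exact pv_filter_length_lt (List.mem_cons_self ..)
      (by simp [mem_closeGo_of_mem _ _ _ _ (List.mem_cons_self ..)])

def find_max_moves_alt (board : List (List Bool)) : Int :=
  ((rooksOf board).length : Int) - (bLoop (rooksOf board) 0 : Int)

-- ===== PRECONDITION & SPEC =====
-- Pre_ excludes exactly the inputs on which Python A raises IndexError: a rook in column x of some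
-- row while another row is at most x long (dfs then evaluates board[j][x] for every row j).
def Pre_find_max_moves (board : List (List Bool)) : Prop :=
  ∀ row ∈ board, ∀ x < row.length, row.getD x false = true → ∀ row' ∈ board, x < row'.length
instance (board : List (List Bool)) : Decidable (Pre_find_max_moves board) := by
  unfold Pre_find_max_moves; infer_instance

def pvWitness_find_max_moves : List (List Bool) := [[true, false], [false, true]]

def Spec_find_max_moves (board : List (List Bool)) (out : Int) : Prop :=
  out = find_max_moves_alt board
instance (board : List (List Bool)) (out : Int) : Decidable (Spec_find_max_moves board out) := by
  unfold Spec_find_max_moves; infer_instance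

-- ===== CLAIM (what is proved, stated in full; the proofs are below) =====
def Claim_equal_find_max_moves : Prop := ∀ (board : List (List Bool)), Dom_find_max_moves board → Pre_find_max_moves board → Spec_find_max_moves board (find_max_moves board)

-- ===== LEMMAS AND PROOFS =====

def ShapeEq (m b : List (List Bool)) : Prop := m.map List.length = b.map List.length

def InShape (m : List (List Bool)) (p : Nat × Nat) : Prop :=
  p.1 < m.length ∧ p.2 < (m.getD p.1 []).length

def adjP (p q : Nat × Nat) : Prop := p ≠ q ∧ (p.1 = q.1 ∨ p.2 = q.2)

def relR (b V : List (List Bool)) (a c : Nat × Nat) : Prop :=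
  pvCell b c = true ∧ pvCell V c = false ∧ adjP a c

def Reach (b V : List (List Bool)) (r q : Nat × Nat) : Prop :=
  Relation.ReflTransGen (relR b V) r q

def connStep (l : List (Nat × Nat)) (a c : Nat × Nat) : Prop := c ∈ l ∧ adjP a c

def ConnL (l : List (Nat × Nat)) (r q : Nat × Nat) : Prop :=
  Relation.ReflTransGen (connStep l) r q

def allPos (m : List (List Bool)) : List (Nat × Nat) :=
  (List.range m.length).flatMap (fun y =>
    (List.range ((m.getD y []).length)).map (fun x => (y, x)))

def trues (m : List (List Bool)) : Nat := ((allPos m).filter (fun q => pvCell m q)).length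

-- ---- basic shape/cell lemmas ----

theorem len_getD_eq (m : List (List Bool)) (y : Nat) :
    ((m.getD y []).length) = (m.map List.length).getD y 0 := by
  simp only [List.getD_eq_getElem?_getD, List.getElem?_map]
  cases m[y]? <;> simp

theorem shapeEq_length {m b : List (List Bool)} (h : ShapeEq m b) : m.length = b.length := by
  simpa using congrArg List.length h

theorem shapeEq_row {m b : List (List Bool)} (h : ShapeEq m b) (y : Nat) :
    (m.getD y []).length = (b.getD y []).length := by
  rw [len_getD_eq, len_getD_eq, h]

theorem allPos_shapeEq {m b : List (List Bool)} (h : ShapeEq m b) : allPos m = allPos b := by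
  unfold allPos
  rw [shapeEq_length h]
  congr 1
  funext y
  rw [shapeEq_row h]

theorem mem_allPos {m : List (List Bool)} {c : Nat × Nat} :
    c ∈ allPos m ↔ InShape m c := by
  unfold allPos InShape
  simp only [List.mem_flatMap, List.mem_range, List.mem_map]
  constructor
  · rintro ⟨y, hy, x, hx, rfl⟩; exact ⟨hy, hx⟩
  · rintro ⟨h1, h2⟩; exact ⟨c.1, h1, c.2, h2, (by simp)⟩

theorem nodup_allPos (m : List (List Bool)) : (allPos m).Nodup := by
  unfold allPos
  generalize (fun y => ((m.getD y []).length)) = g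
  generalize m.length = n
  induction n with
  | zero => simp
  | succ n ih =>
    rw [List.range_succ, List.flatMap_append]
    simp only [List.flatMap_cons, List.flatMap_nil, List.append_nil]
    refine List.Nodup.append ih ?_ ?_
    · exact (List.nodup_range).map (fun a b hab => by simpa using hab)
    · intro a ha hb
      simp only [List.mem_flatMap, List.mem_range, List.mem_map] at ha
      simp only [List.mem_map, List.mem_range] at hb
      obtain ⟨y, hy, x, _, rfl⟩ := ha
      obtain ⟨x', _, hx'⟩ := hb
      have : y = n := by
        have := congrArg Prod.fst hx'
        simpa using this.symm
      omega

theorem cell_inShape {m : List (List Bool)} {p : Nat × Nat} (h : pvCell m p = true) :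
    InShape m p := by
  unfold pvCell at h
  have h2 : p.2 < (m.getD p.1 []).length := by
    by_contra hc
    rw [List.getD_eq_default _ _ (Nat.le_of_not_lt hc)] at h
    cases h
  have h1 : p.1 < m.length := by
    by_contra hc
    rw [List.getD_eq_default _ _ (Nat.le_of_not_lt hc)] at h2
    simp at h2
  exact ⟨h1, h2⟩

theorem inShape_shapeEq {m b : List (List Bool)} (h : ShapeEq m b) (p : Nat × Nat) :
    InShape m p ↔ InShape b p := by
  unfold InShape
  rw [shapeEq_length h, shapeEq_row h]

theorem getD_modify (m : List (List Bool)) (i j : Nat) (f : List Bool → List Bool) :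
    (m.modify i f).getD j [] = if j = i ∧ i < m.length then f (m.getD i []) else m.getD j [] := by
  simp only [List.getD_eq_getElem?_getD, List.getElem?_modify]
  by_cases hji : j = i
  · subst hji
    by_cases hi : j < m.length
    · rw [List.getElem?_eq_getElem hi]
      simp [hi, List.getD_eq_getElem?_getD, List.getElem?_eq_getElem hi]
    · rw [List.getElem?_eq_none (Nat.le_of_not_lt hi)]
      simp [hi]
  · have hij : i ≠ j := fun h => hji h.symm
    cases m[j]? <;> simp [hij] <;> exact fun h _ => absurd h hji

theorem getD_set_bool (r : List Bool) (i j : Nat) (a d : Bool) :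
    (r.set i a).getD j d = if j = i ∧ i < r.length then a else r.getD j d := by
  simp only [List.getD_eq_getElem?_getD, List.getElem?_set]
  by_cases hji : j = i
  · subst hji
    by_cases hi : j < r.length <;> simp [hi]
  · have hij : i ≠ j := fun h => hji h.symm
    simp [hij]
    exact fun h _ => absurd h hji

theorem shapeEq_mark {m b : List (List Bool)} (h : ShapeEq m b) (p : Nat × Nat) :
    ShapeEq (pvMark m p) b := by
  unfold ShapeEq pvMark at *
  rw [← h]
  apply List.ext_getElem?
  intro n
  simp only [List.getElem?_map, List.getElem?_modify]
  by_cases hn : p.1 = n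
  · cases hmn : m[n]? <;> simp [hn, hmn]
  · simp [hn]

theorem cell_mark {m : List (List Bool)} {p q : Nat × Nat} :
    pvCell (pvMark m p) q = true ↔ (pvCell m q = true ∨ (q = p ∧ InShape m p)) := by
  unfold pvCell pvMark InShape
  rw [getD_modify]
  split_ifs with h1
  · rw [h1.1, getD_set_bool]
    split_ifs with h2
    · have h3 := h2.2
      rw [List.getD_eq_getElem _ _ h1.2] at h3
      simp [Prod.ext h1.1 h2.1, h1.2, h3]
    · constructor
      · exact Or.inl
      · rintro (h | ⟨rfl, hs⟩)
        · exact h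
        · exact absurd ⟨rfl, hs.2⟩ h2
  · constructor
    · exact Or.inl
    · rintro (h | ⟨rfl, hs⟩)
      · exact h
      · exact absurd ⟨rfl, hs.1⟩ h1

theorem cell_mark_ne {m : List (List Bool)} {p q : Nat × Nat} (h : q ≠ p) :
    pvCell (pvMark m p) q = pvCell m q := by
  unfold pvCell pvMark
  rw [getD_modify]
  split_ifs with h1
  · rw [h1.1, getD_set_bool]
    have hne : ¬(q.2 = p.2 ∧ p.2 < (m.getD p.1 []).length) := fun hx => h (Prod.ext h1.1 hx.1)
    rw [if_neg hne]
  · rfl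

theorem cells_eq_allPos (m : List (List Bool)) : pvCells m = (allPos m).length := by
  unfold pvCells allPos
  rw [List.length_flatMap]
  have : (List.range m.length).map (fun y => ((List.range ((m.getD y []).length)).map (fun x => (y, x))).length)
      = m.map List.length := by
    apply List.ext_getElem (by simp)
    intro i h1 h2
    simp only [List.getElem_map, List.getElem_range, List.length_map, List.length_range]
    rw [List.getD_eq_getElem _ _ (by simpa using h2)]
  rw [this]

theorem trues_le_cells (m : List (List Bool)) : trues m ≤ pvCells m := by
  rw [cells_eq_allPos]
  exact List.length_filter_le _ _

theorem cells_shapeEq {m b : List (List Bool)} (h : ShapeEq m b) : pvCells m = pvCells b := by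
  rw [cells_eq_allPos, cells_eq_allPos, allPos_shapeEq h]

theorem length_filter_update {L : List (Nat × Nat)} (hN : L.Nodup) {g g' : Nat × Nat → Bool}
    {p : Nat × Nat} (hp : p ∈ L) (hgp : g p = false) (hg'p : g' p = true)
    (hcong : ∀ q, q ≠ p → g' q = g q) :
    (L.filter g').length = (L.filter g).length + 1 := by
  induction L with
  | nil => cases hp
  | cons a t ih =>
    rcases List.mem_cons.1 hp with heq | hat
    · subst heq
      have hpt : p ∉ t := (List.nodup_cons.1 hN).1
      have ht : t.filter g' = t.filter g :=
        List.filter_congr (fun q hq => hcong q (fun h => hpt (h ▸ hq)))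
      simp [List.filter_cons, hg'p, hgp, ht]

    · have hap : a ≠ p := fun h => (List.nodup_cons.1 hN).1 (h ▸ hat)
      have ha : g' a = g a := hcong a hap
      have iht := ih (List.nodup_cons.1 hN).2 hat
      by_cases hga : g a = true
      · simp [List.filter_cons, hga, ha, iht]
      · simp only [Bool.not_eq_true] at hga
        simp [List.filter_cons, hga, ha, iht]

theorem trues_mark {m : List (List Bool)} {p : Nat × Nat} (hs : InShape m p)
    (hf : pvCell m p = false) : trues (pvMark m p) = trues m + 1 := by
  unfold trues
  rw [allPos_shapeEq (shapeEq_mark (b := m) rfl p)]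
  exact length_filter_update (nodup_allPos m) (mem_allPos.2 hs) hf
    (cell_mark.2 (Or.inr ⟨rfl, hs⟩)) (fun q hq => cell_mark_ne hq)

theorem cell_fresh (m : List (List Bool)) (q : Nat × Nat) :
    pvCell (m.map (fun row => row.map (fun _ => false))) q = false := by
  unfold pvCell
  simp only [List.getD_eq_getElem?_getD, List.getElem?_map]
  cases h1 : m[q.1]? with
  | none => simp
  | some r =>
    simp only [Option.map_some, Option.getD_some, List.getElem?_map]
    cases h2 : r[q.2]? <;> simp

theorem shapeEq_fresh (m : List (List Bool)) :
    ShapeEq (m.map (fun row => row.map (fun _ => false))) m := by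
  simp [ShapeEq, List.map_map, Function.comp]

theorem trues_fresh (m : List (List Bool)) :
    trues (m.map (fun row => row.map (fun _ => false))) = 0 := by
  unfold trues
  rw [List.filter_eq_nil_iff.2 (fun q _ => by rw [cell_fresh]; simp)]
  rfl

-- ---- dfs characterisation ----

def NewClosed (b V W : List (List Bool)) : Prop :=
  ∀ a q, pvCell W a = true → pvCell V a = false → pvCell b q = true → adjP a q →
    pvCell W q = true

structure DfsInv (b V : List (List Bool)) (p : Nat × Nat) (W : List (List Bool)) : Prop where
  shape : ShapeEq W b
  monoV : ∀ q, pvCell V q = true → pvCell W q = true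
  sound : ∀ q, pvCell W q = true → pvCell V q = true ∨ Reach b V p q
  root : pvCell W p = true
  pinv : ∀ a q, a ≠ p → pvCell W a = true → pvCell V a = false →
           pvCell b q = true → adjP a q → pvCell W q = true

def dstep (f : Nat) (b : List (List Bool)) (p : Nat × Nat)
    (st : Int × List (List Bool)) (c : Nat × Nat) : Int × List (List Bool) :=
  if c ≠ p ∧ pvCell b c = true ∧ pvCell st.2 c = false then
    let r := dfsA f b c.2 c.1 st.2
    (st.1 + r.1, r.2)
  else st

theorem dfsA_succ (f : Nat) (b : List (List Bool)) (x y : Nat) (V : List (List Bool)) :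
    dfsA (f+1) b x y V =
      ((((List.range ((b.getD y []).length)).map (fun i => (y, i))).foldl
          (dstep f b (y, x))
          (((List.range b.length).map (fun j => (j, x))).foldl (dstep f b (y, x))
            ((0 : Int), pvMark V (y, x)))).1 + 1,
       (((List.range ((b.getD y []).length)).map (fun i => (y, i))).foldl
          (dstep f b (y, x))
          (((List.range b.length).map (fun j => (j, x))).foldl (dstep f b (y, x))
            ((0 : Int), pvMark V (y, x)))).2) := by
  conv_rhs => rw [List.foldl_map, List.foldl_map]
  have h1 : (fun (st : Int × List (List Bool)) (j : Nat) => dstep f b (y, x) st (j, x))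
      = (fun (st : Int × List (List Bool)) j =>
          if j ≠ y ∧ pvCell b (j, x) = true ∧ pvCell st.2 (j, x) = false then
            let r := dfsA f b x j st.2
            (st.1 + r.1, r.2)
          else st) := by
    funext st j
    simp only [dstep]
    refine if_congr ?_ rfl rfl
    simp [Prod.ext_iff]
  have h2 : (fun (st : Int × List (List Bool)) (i : Nat) => dstep f b (y, x) st (y, i))
      = (fun (st : Int × List (List Bool)) i =>
          if i ≠ x ∧ pvCell b (y, i) = true ∧ pvCell st.2 (y, i) = false then
            let r := dfsA f b i y st.2
            (st.1 + r.1, r.2)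
          else st) := by
    funext st i
    simp only [dstep]
    refine if_congr ?_ rfl rfl
    simp [Prod.ext_iff]
  rw [h1, h2]
  rfl

def DfsSpec (f : Nat) : Prop := ∀ (b : List (List Bool)) (x y : Nat) (V : List (List Bool)),
  pvCell b (y, x) = true → pvCell V (y, x) = false → ShapeEq V b →
  pvCells b < f + trues V →
  DfsInv b V (y, x) (dfsA f b x y V).2 ∧
  ((dfsA f b x y V).1 + (trues V : Int) = (trues (dfsA f b x y V).2 : Int)) ∧
  trues V ≤ trues (dfsA f b x y V).2 ∧
  NewClosed b V (dfsA f b x y V).2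

theorem loop_spec (f : Nat) (b : List (List Bool)) (p : Nat × Nat) (V : List (List Bool))
    (IH : DfsSpec f) (hVp : pvCell V p = false) :
    ∀ (cands : List (Nat × Nat)) (st : Int × List (List Bool)),
      (∀ c ∈ cands, c.1 = p.1 ∨ c.2 = p.2) →
      DfsInv b V p st.2 →
      pvCells b < f + trues st.2 →
      DfsInv b V p (cands.foldl (dstep f b p) st).2 ∧
      ((cands.foldl (dstep f b p) st).1 + (trues st.2 : Int)
        = st.1 + (trues (cands.foldl (dstep f b p) st).2 : Int)) ∧
      trues st.2 ≤ trues (cands.foldl (dstep f b p) st).2 ∧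
      (∀ q, pvCell st.2 q = true → pvCell (cands.foldl (dstep f b p) st).2 q = true) ∧
      (∀ c ∈ cands, pvCell b c = true → pvCell (cands.foldl (dstep f b p) st).2 c = true) := by
  intro cands
  induction cands with
  | nil =>
    intro st _ hinv _
    exact ⟨hinv, by simp, le_rfl, fun q h => h, by simp⟩
  | cons c cs ih =>
    intro st hc hinv hfuel
    simp only [List.foldl_cons]
    by_cases hg : c ≠ p ∧ pvCell b c = true ∧ pvCell st.2 c = false
    · obtain ⟨hcp, hbc, hWc⟩ := hg
      have hstep : dstep f b p st c = (st.1 + (dfsA f b c.2 c.1 st.2).1, (dfsA f b c.2 c.1 st.2).2) := by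
        unfold dstep
        rw [if_pos ⟨hcp, hbc, hWc⟩]
      have hVc : pvCell V c = false := by
        cases hcv : pvCell V c
        · rfl
        · rw [hinv.monoV c hcv] at hWc; cases hWc
      have hadj : adjP p c := ⟨Ne.symm hcp, (hc c (List.mem_cons_self ..)).imp Eq.symm Eq.symm⟩
      obtain ⟨sinv, scount, strues, sclosed⟩ :=
        IH b c.2 c.1 st.2 hbc hWc hinv.shape hfuel
      set r := dfsA f b c.2 c.1 st.2 with hr
      have hrel : relR b V p c := ⟨hbc, hVc, hadj⟩
      have hreach_mono : ∀ q, Reach b st.2 c q → Reach b V c q := by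
        intro q hq
        refine Relation.ReflTransGen.mono ?_ hq
        intro a d hd
        obtain ⟨hd1, hd2, hd3⟩ := hd
        refine ⟨hd1, ?_, hd3⟩
        cases hVd : pvCell V d
        · rfl
        · rw [hinv.monoV d hVd] at hd2; cases hd2
      have hinv' : DfsInv b V p r.2 :=
        { shape := sinv.shape
          monoV := fun q h => sinv.monoV q (hinv.monoV q h)
          sound := by
            intro q h
            rcases sinv.sound q h with h1 | h1
            · exact hinv.sound q h1
            · exact Or.inr (Relation.ReflTransGen.trans
                (Relation.ReflTransGen.single hrel) (hreach_mono q h1))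
          root := sinv.monoV p hinv.root
          pinv := by
            intro a q ha hWa hVa hbq hadjq
            cases hsta : pvCell st.2 a
            · exact sclosed a q hWa hsta hbq hadjq
            · exact sinv.monoV q (hinv.pinv a q ha hsta hVa hbq hadjq) }
      have hfuel' : pvCells b < f + trues r.2 := lt_of_lt_of_le hfuel (by omega)
      obtain ⟨finv, fcount, ftrues, fmono, fcand⟩ :=
        ih (st.1 + r.1, r.2) (fun d hd => hc d (List.mem_cons_of_mem _ hd)) hinv' hfuel'
      rw [hstep]
      refine ⟨finv, ?_, le_trans strues ftrues, ?_, ?_⟩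
      · simp only at fcount ⊢
        omega
      · intro q h
        exact fmono q (sinv.monoV q h)
      · intro d hd hbd
        rcases List.mem_cons.1 hd with rfl | hd'
        · exact fmono d sinv.root
        · exact fcand d hd' hbd
    · have hstep : dstep f b p st c = st := by
        unfold dstep
        rw [if_neg hg]
      rw [hstep]
      obtain ⟨finv, fcount, ftrues, fmono, fcand⟩ :=
        ih st (fun d hd => hc d (List.mem_cons_of_mem _ hd)) hinv hfuel
      refine ⟨finv, fcount, ftrues, fmono, ?_⟩
      intro d hd hbd
      rcases List.mem_cons.1 hd with rfl | hd'
      · push_neg at hg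
        rcases Decidable.em (d = p) with rfl | hdp
        · exact fmono d hinv.root
        · have := hg hdp hbd
          simp only [Bool.not_eq_false] at this
          exact fmono d this
      · exact fcand d hd' hbd

theorem dfsA_spec (f : Nat) : DfsSpec f := by
  induction f with
  | zero =>
    intro b x y V hb hV hsh hfuel
    exfalso
    have h1 : trues V ≤ pvCells V := trues_le_cells V
    have h2 : pvCells V = pvCells b := cells_shapeEq hsh
    omega
  | succ f ih =>
    intro b x y V hb hV hsh hfuel
    have hshape0 : InShape V (y, x) := (inShape_shapeEq hsh _).2 (cell_inShape hb)
    have hroot1 : pvCell (pvMark V (y, x)) (y, x) = true := cell_mark.2 (Or.inr ⟨rfl, hshape0⟩)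
    have htrue1 : trues (pvMark V (y, x)) = trues V + 1 := trues_mark hshape0 hV
    have hinv1 : DfsInv b V (y, x) (pvMark V (y, x)) :=
      { shape := shapeEq_mark hsh _
        monoV := fun q h => cell_mark.2 (Or.inl h)
        sound := fun q h => by
          rcases cell_mark.1 h with h1 | ⟨rfl, _⟩
          · exact Or.inl h1
          · exact Or.inr Relation.ReflTransGen.refl
        root := hroot1
        pinv := by
          intro a q ha hWa hVa _ _
          rcases cell_mark.1 hWa with h1 | ⟨rfl, _⟩
          · rw [h1] at hVa; cases hVa
          · exact absurd rfl ha }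
    have hc1 : ∀ c ∈ (List.range b.length).map (fun j => (j, x)), c.1 = (y, x).1 ∨ c.2 = (y, x).2 := by
      intro c hcm
      simp only [List.mem_map, List.mem_range] at hcm
      obtain ⟨j, _, rfl⟩ := hcm
      exact Or.inr rfl
    have hc2 : ∀ c ∈ (List.range ((b.getD y []).length)).map (fun i => (y, i)),
        c.1 = (y, x).1 ∨ c.2 = (y, x).2 := by
      intro c hcm
      simp only [List.mem_map, List.mem_range] at hcm
      obtain ⟨i, _, rfl⟩ := hcm
      exact Or.inl rfl
    obtain ⟨inv1, cnt1, tr1, mono1, cc1⟩ :=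
      loop_spec f b (y, x) V ih hV ((List.range b.length).map (fun j => (j, x)))
        ((0 : Int), pvMark V (y, x)) hc1 hinv1
        (show pvCells b < f + trues (pvMark V (y, x)) by omega)
    set s1 := ((List.range b.length).map (fun j => (j, x))).foldl (dstep f b (y, x))
        ((0 : Int), pvMark V (y, x)) with hs1
    obtain ⟨inv2, cnt2, tr2, mono2, cc2⟩ :=
      loop_spec f b (y, x) V ih hV ((List.range ((b.getD y []).length)).map (fun i => (y, i)))
        s1 hc2 inv1
        (by have tr1' : trues (pvMark V (y, x)) ≤ trues s1.2 := tr1; omega)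
    set s2 := ((List.range ((b.getD y []).length)).map (fun i => (y, i))).foldl (dstep f b (y, x)) s1 with hs2
    rw [dfsA_succ]
    have hclosed : NewClosed b V (s2.2) := by
      intro a q hWa hVa hbq hadjq
      rcases Decidable.em (a = (y, x)) with rfl | hap
      · have hqs := cell_inShape hbq
        rcases hadjq.2 with h | h
        · -- same row: q = (y, q.2), q ∈ cands2
          have hqm : q ∈ (List.range ((b.getD y []).length)).map (fun i => (y, i)) := by
            simp only [List.mem_map, List.mem_range]
            refine ⟨q.2, ?_, ?_⟩
            · have := hqs.2
              rw [← h] at this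
              exact this
            · exact Prod.ext h rfl
          exact cc2 q hqm hbq
        · -- same column: q = (q.1, x), q ∈ cands1
          have hqm : q ∈ (List.range b.length).map (fun j => (j, x)) := by
            simp only [List.mem_map, List.mem_range]
            exact ⟨q.1, hqs.1, Prod.ext rfl h⟩
          exact mono2 q (cc1 q hqm hbq)
      · exact inv2.pinv a q hap hWa hVa hbq hadjq
    refine ⟨⟨inv2.shape, inv2.monoV, inv2.sound, inv2.root, inv2.pinv⟩, ?_, ?_, hclosed⟩
    · show (s2.1 + 1) + (trues V : Int) = (trues s2.2 : Int)
      have c1 : s1.1 + (trues (pvMark V (y, x)) : Int) = 0 + (trues s1.2 : Int) := cnt1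
      have c2 : s2.1 + (trues s1.2 : Int) = s1.1 + (trues s2.2 : Int) := cnt2
      omega
    · show trues V ≤ trues s2.2
      have t1 : trues (pvMark V (y, x)) ≤ trues s1.2 := tr1
      omega

theorem reach_rook {b V : List (List Bool)} {r q : Nat × Nat} (h : Reach b V r q) :
    q = r ∨ pvCell b q = true := by
  rcases Relation.ReflTransGen.cases_tail h with h1 | ⟨c, _, hc⟩
  · exact Or.inl h1
  · exact Or.inr hc.1

theorem dfsA_char (f : Nat) (b : List (List Bool)) (x y : Nat) (V : List (List Bool))
    (hb : pvCell b (y, x) = true) (hV : pvCell V (y, x) = false) (hsh : ShapeEq V b)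
    (hf : pvCells b < f + trues V) :
    ∀ q, pvCell (dfsA f b x y V).2 q = true ↔
      (pvCell V q = true ∨ Reach b V (y, x) q) := by
  have spec := dfsA_spec f b x y V hb hV hsh hf
  intro q
  constructor
  · exact spec.1.sound q
  · rintro (h | h)
    · exact spec.1.monoV q h
    · induction h with
      | refl => exact spec.1.root
      | tail hpath hstep ihp =>
        rename_i b' q'
        have hVb' : pvCell V b' = false := by
          rcases Relation.ReflTransGen.cases_tail hpath with h1 | ⟨d, _, hd⟩
          · rw [h1]; exact hV
          · exact hd.2.1
        exact spec.2.2.2 b' q' ihp hVb' hstep.1 hstep.2.2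

-- ---- clear_board characterisation ----

theorem map_length_modify (m : List (List Bool)) (i : Nat) (f : List Bool → List Bool)
    (hf : ∀ r, (f r).length = r.length) :
    (m.modify i f).map List.length = m.map List.length := by
  apply List.ext_getElem?
  intro n
  simp only [List.getElem?_map, List.getElem?_modify]
  by_cases hn : i = n
  · cases hmn : m[n]? <;> simp [hn, hmn, hf]
  · simp [hn]

theorem map_length_clearRowStep (V : List (List Bool)) (y : Nat) (bc : List (List Bool)) (x : Nat) :
    (clearRowStep V y bc x).map List.length = bc.map List.length := by
  unfold clearRowStep
  split_ifs with h
  · exact map_length_modify bc y _ (fun r => List.length_set ..)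
  · rfl

theorem fold_clearRow_map_length (V : List (List Bool)) (y : Nat) :
    ∀ (xs : List Nat) (bc : List (List Bool)),
      ((xs.foldl (clearRowStep V y) bc).map List.length) = bc.map List.length := by
  intro xs
  induction xs with
  | nil => intro bc; rfl
  | cons x xs ih =>
    intro bc
    rw [List.foldl_cons, ih, map_length_clearRowStep]

theorem cell_fold_clearRow (V : List (List Bool)) (y : Nat) :
    ∀ (xs : List Nat) (bc : List (List Bool)) (q : Nat × Nat),
      pvCell (xs.foldl (clearRowStep V y) bc) q
        = if q.1 = y ∧ q.2 ∈ xs ∧ pvCell V (y, q.2) = true then false else pvCell bc q := by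
  intro xs
  induction xs with
  | nil => intro bc q; simp
  | cons x xs ih =>
    intro bc q
    rw [List.foldl_cons, ih]
    have hstep : pvCell (clearRowStep V y bc x) q
        = if q = (y, x) ∧ pvCell V (y, x) = true then false else pvCell bc q := by
      unfold clearRowStep
      by_cases h1 : pvCell V (y, x) = true
      · rw [if_pos h1]
        by_cases h2 : q = (y, x)
        · subst h2
          rw [if_pos ⟨rfl, h1⟩]
          unfold pvCell
          rw [getD_modify]
          split_ifs with h3
          · rw [getD_set_bool]
            split_ifs with h4
            · rfl
            · have hge : (bc.getD y []).length ≤ x := Nat.le_of_not_lt (fun hlt => h4 ⟨rfl, hlt⟩)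
              rw [List.getD_eq_default _ _ hge]
          · have hge : bc.length ≤ y := Nat.le_of_not_lt (fun hlt => h3 ⟨rfl, hlt⟩)
            rw [List.getD_eq_default _ _ hge]
            rfl
        · rw [if_neg (fun hx : _ ∧ _ => h2 hx.1)]
          unfold pvCell
          rw [getD_modify]
          split_ifs with h3
          · rw [h3.1, getD_set_bool]
            have hne : ¬(q.2 = x ∧ x < (bc.getD y []).length) := fun hx => h2 (Prod.ext h3.1 hx.1)
            rw [if_neg hne]
          · rfl
      · rw [if_neg h1, if_neg (fun hx => h1 hx.2)]
    rw [hstep]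
    by_cases hA : q.1 = y ∧ q.2 ∈ xs ∧ pvCell V (y, q.2) = true
    · rw [if_pos hA, if_pos ⟨hA.1, List.mem_cons_of_mem _ hA.2.1, hA.2.2⟩]
    · rw [if_neg hA]
      by_cases hB : q = (y, x) ∧ pvCell V (y, x) = true
      · obtain ⟨hq, hBV⟩ := hB
        subst hq
        rw [if_pos ⟨rfl, hBV⟩, if_pos ⟨rfl, List.mem_cons_self .., hBV⟩]
      · rw [if_neg hB, if_neg]
        rintro ⟨hq1, hq2, hq3⟩
        rcases List.mem_cons.1 hq2 with h | h
        · exact hB ⟨Prod.ext hq1 h, h ▸ hq3⟩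
        · exact hA ⟨hq1, h, hq3⟩

theorem fold_clearY_map_length (V : List (List Bool)) :
    ∀ (ys : List Nat) (bc : List (List Bool)),
      ((ys.foldl (clearYStep V) bc).map List.length) = bc.map List.length := by
  intro ys
  induction ys with
  | nil => intro bc; rfl
  | cons y ys ih =>
    intro bc
    rw [List.foldl_cons, ih]
    unfold clearYStep
    rw [fold_clearRow_map_length]

theorem cell_fold_clearY (V : List (List Bool)) :
    ∀ (ys : List Nat) (bc : List (List Bool)) (q : Nat × Nat),
      pvCell (ys.foldl (clearYStep V) bc) q
        = if q.1 ∈ ys ∧ q.2 < ((bc.getD q.1 []).length) ∧ pvCell V q = true then false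
          else pvCell bc q := by
  intro ys
  induction ys with
  | nil => intro bc q; simp
  | cons y ys ih =>
    intro bc q
    rw [List.foldl_cons, ih]
    have hlen : (((clearYStep V bc y).getD q.1 []).length) = ((bc.getD q.1 []).length) := by
      rw [len_getD_eq, len_getD_eq]
      unfold clearYStep
      rw [fold_clearRow_map_length]
    have hstep : pvCell (clearYStep V bc y) q
        = if q.1 = y ∧ q.2 < ((bc.getD y []).length) ∧ pvCell V q = true then false
          else pvCell bc q := by
      unfold clearYStep
      rw [cell_fold_clearRow]
      by_cases hA : q.1 = y ∧ q.2 ∈ List.range ((bc.getD y []).length) ∧ pvCell V (y, q.2) = true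
      · rw [if_pos hA, if_pos]
        refine ⟨hA.1, List.mem_range.1 hA.2.1, ?_⟩
        have hq : q = (y, q.2) := Prod.ext hA.1 rfl
        rw [hq]
        exact hA.2.2
      · rw [if_neg hA, if_neg]
        rintro ⟨h1, h2, h3⟩
        refine hA ⟨h1, List.mem_range.2 h2, ?_⟩
        have hq : (y, q.2) = q := (Prod.ext h1 rfl : q = (y, q.2)).symm
        rw [hq]
        exact h3
    simp only [hlen]
    rw [hstep]
    by_cases hA : q.1 ∈ ys ∧ q.2 < ((bc.getD q.1 []).length) ∧ pvCell V q = true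
    · rw [if_pos hA, if_pos ⟨List.mem_cons_of_mem _ hA.1, hA.2⟩]
    · rw [if_neg hA]
      by_cases hB : q.1 = y ∧ q.2 < ((bc.getD y []).length) ∧ pvCell V q = true
      · rw [if_pos hB, if_pos]
        refine ⟨?_, ?_, hB.2.2⟩
        · rw [hB.1]; exact List.mem_cons_self ..
        · rw [hB.1]; exact hB.2.1
      · rw [if_neg hB, if_neg]
        rintro ⟨h1, h2, h3⟩
        rcases List.mem_cons.1 h1 with h | h
        · exact hB ⟨h, by rw [← h]; exact h2, h3⟩
        · exact hA ⟨h, h2, h3⟩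

theorem cell_clearA {b V : List (List Bool)} (q : Nat × Nat) :
    pvCell (clearA b V) q = (pvCell b q && !pvCell V q) := by
  unfold clearA
  rw [cell_fold_clearY]
  cases hbq : pvCell b q <;> cases hVq : pvCell V q
  · simp [hVq]
  · simp [hVq, hbq]
  · simp [hVq]
  · have hs := cell_inShape hbq
    have hs2 := hs.2
    rw [List.getD_eq_getElem?_getD] at hs2
    simp [hVq, hbq, List.mem_range.2 hs.1, hs2]

theorem shapeEq_clearA (b V : List (List Bool)) : ShapeEq (clearA b V) b := by
  unfold ShapeEq clearA
  rw [fold_clearY_map_length]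

-- ---- outer loop of A flattened to a fold over positions ----

def posStep (st : Int × List (List Bool)) (c : Nat × Nat) : Int × List (List Bool) :=
  if pvCell st.2 c = true then
    let visited := st.2.map (fun row => row.map (fun _ => false))
    let r := dfsA (pvCells st.2 + 1) st.2 c.2 c.1 visited
    (st.1 + r.1 - 1, clearA st.2 r.2)
  else st

theorem map_length_posStep (st : Int × List (List Bool)) (c : Nat × Nat) :
    ((posStep st c).2).map List.length = st.2.map List.length := by
  unfold posStep
  split_ifs with h
  · exact shapeEq_clearA st.2 _
  · rfl

theorem map_length_foldl_posStep :
    ∀ (L : List (Nat × Nat)) (st : Int × List (List Bool)),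
      ((L.foldl posStep st).2).map List.length = st.2.map List.length := by
  intro L
  induction L with
  | nil => intro st; rfl
  | cons c L ih =>
    intro st
    rw [List.foldl_cons, ih, map_length_posStep]

theorem fold_flat (b : List (List Bool)) :
    ∀ (ys : List Nat) (st : Int × List (List Bool)),
      st.2.map List.length = b.map List.length →
      ys.foldl (fun (st : Int × List (List Bool)) y =>
          (List.range ((st.2.getD y []).length)).foldl (fun (st2 : Int × List (List Bool)) x =>
            if pvCell st2.2 (y, x) = true then
              let visited := st2.2.map (fun row => row.map (fun _ => false))
              let r := dfsA (pvCells st2.2 + 1) st2.2 x y visited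
              (st2.1 + r.1 - 1, clearA st2.2 r.2)
            else st2) st) st
      = (ys.flatMap (fun y => (List.range ((b.getD y []).length)).map (fun x => (y, x)))).foldl
          posStep st := by
  intro ys
  induction ys with
  | nil => intro st _; rfl
  | cons y ys ih =>
    intro st hsh
    rw [List.foldl_cons, List.flatMap_cons, List.foldl_append]
    have hlen : ((st.2.getD y []).length) = ((b.getD y []).length) := by
      rw [len_getD_eq, len_getD_eq, hsh]
    have hinner : (List.range ((st.2.getD y []).length)).foldl
          (fun (st2 : Int × List (List Bool)) x =>
            if pvCell st2.2 (y, x) = true then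
              let visited := st2.2.map (fun row => row.map (fun _ => false))
              let r := dfsA (pvCells st2.2 + 1) st2.2 x y visited
              (st2.1 + r.1 - 1, clearA st2.2 r.2)
            else st2) st
        = ((List.range ((b.getD y []).length)).map (fun x => (y, x))).foldl posStep st := by
      rw [hlen, List.foldl_map]
      rfl
    rw [hinner]
    exact ih _ (by rw [map_length_foldl_posStep]; exact hsh)

theorem find_max_moves_eq_flat (board : List (List Bool)) :
    find_max_moves board = ((allPos board).foldl posStep ((0 : Int), board)).1 := by
  unfold find_max_moves
  rw [fold_flat board (List.range board.length) ((0 : Int), board) rfl]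
  rfl

-- ---- rook list and component lemmas (B side) ----

theorem pv_filter_flatMap (l : List Nat) (f : Nat → List (Nat × Nat)) (p : Nat × Nat → Bool) :
    (l.flatMap f).filter p = l.flatMap (fun a => (f a).filter p) := by
  induction l with
  | nil => simp
  | cons a t ih => simp [List.flatMap_cons, List.filter_append, ih]

theorem pv_filterMap_eq (L : List Nat) (g : Nat → Nat × Nat) (p : Nat × Nat → Bool) :
    L.filterMap (fun x => if p (g x) = true then some (g x) else none) = (L.map g).filter p := by
  induction L with
  | nil => simp
  | cons a t ih =>
    by_cases h : p (g a) = true <;>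
      simp [List.filterMap_cons, List.filter_cons, h, ih]

theorem rooksOf_eq_filter (b : List (List Bool)) :
    rooksOf b = (allPos b).filter (fun q => pvCell b q) := by
  unfold rooksOf allPos
  rw [pv_filter_flatMap]
  congr 1
  funext y
  exact pv_filterMap_eq _ (fun x => (y, x)) (fun q => pvCell b q)

theorem mem_rooksOf {b : List (List Bool)} {q : Nat × Nat} :
    q ∈ rooksOf b ↔ pvCell b q = true := by
  rw [rooksOf_eq_filter]
  simp only [List.mem_filter, mem_allPos]
  constructor
  · rintro ⟨_, h⟩; exact h
  · intro h; exact ⟨cell_inShape h, h⟩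

theorem nodup_rooksOf (b : List (List Bool)) : (rooksOf b).Nodup := by
  rw [rooksOf_eq_filter]
  exact (nodup_allPos b).filter _

theorem length_eq_of_nodup_mem {l₁ l₂ : List (Nat × Nat)} (h₁ : l₁.Nodup) (h₂ : l₂.Nodup)
    (hm : ∀ a, a ∈ l₁ ↔ a ∈ l₂) : l₁.length = l₂.length := by
  rw [← List.toFinset_card_of_nodup h₁, ← List.toFinset_card_of_nodup h₂]
  congr 1
  ext a
  simp [hm a]

def GoodC (l : List (Nat × Nat)) (r : Nat × Nat) (C : List (Nat × Nat)) : Prop :=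
  C.Nodup ∧ r ∈ C ∧ ∀ q ∈ C, q ∈ l ∧ ConnL l r q

theorem mem_expandB {l C : List (Nat × Nat)} {q : Nat × Nat} :
    q ∈ expandB l C ↔ (q ∈ l ∧ q ∉ C ∧ ∃ p ∈ C, pvAdjB p q = true) := by
  unfold expandB
  simp [List.mem_filter, List.any_eq_true]

theorem goodC_expand {l : List (Nat × Nat)} {r : Nat × Nat} {C : List (Nat × Nat)}
    (hN : l.Nodup) (h : GoodC l r C) : GoodC l r (C ++ expandB l C) := by
  obtain ⟨hnd, hr, hmem⟩ := h
  refine ⟨?_, List.mem_append_left _ hr, ?_⟩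
  · refine List.Nodup.append hnd (hN.filter _) ?_
    intro a ha hb
    exact (mem_expandB.1 hb).2.1 ha
  · intro q hq
    rcases List.mem_append.1 hq with h1 | h1
    · exact hmem q h1
    · obtain ⟨hql, hqc, p, hp, hadj⟩ := mem_expandB.1 h1
      have hpq : adjP p q := by
        refine ⟨fun h => hqc (h ▸ hp), ?_⟩
        unfold pvAdjB at hadj
        simpa using hadj
      exact ⟨hql, Relation.ReflTransGen.tail (hmem p hp).2 ⟨hql, hpq⟩⟩

theorem expand_nil_complete {l : List (Nat × Nat)} {r : Nat × Nat} {C : List (Nat × Nat)}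
    (hE : expandB l C = []) (hmemC : r ∈ C) :
    ∀ q, ConnL l r q → q ∈ C := by
  intro q hq
  induction hq with
  | refl => exact hmemC
  | tail hpath hstep ihp =>
    rename_i p' q'
    by_cases hqC : q' ∈ C
    · exact hqC
    · exfalso
      have hmem : q' ∈ expandB l C := by
        refine mem_expandB.2 ⟨hstep.1, hqC, p', ihp, ?_⟩
        unfold pvAdjB
        rcases hstep.2.2 with h | h <;> simp [h]
      rw [hE] at hmem
      cases hmem

theorem nodup_length_le {C l : List (Nat × Nat)} (hC : C.Nodup) (hsub : ∀ q ∈ C, q ∈ l) :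
    C.length ≤ l.length := by
  calc C.length = C.toFinset.card := (List.toFinset_card_of_nodup hC).symm
    _ ≤ l.toFinset.card := Finset.card_le_card (fun a ha => by
        simp only [List.mem_toFinset] at ha ⊢
        exact hsub a ha)
    _ ≤ l.length := l.toFinset_card_le

theorem closeGo_stab (l : List (Nat × Nat)) (hN : l.Nodup) (r : Nat × Nat) :
    ∀ (f : Nat) (C : List (Nat × Nat)), GoodC l r C → l.length + 1 ≤ f + C.length →
      expandB l (closeGo f l C) = [] ∧ GoodC l r (closeGo f l C) := by
  intro f
  induction f with
  | zero =>
    intro C hG hlen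
    exfalso
    have := nodup_length_le hG.1 (fun q hq => (hG.2.2 q hq).1)
    omega
  | succ f ih =>
    intro C hG hlen
    simp only [closeGo]
    by_cases hE : expandB l C = []
    · rw [if_pos hE]
      exact ⟨hE, hG⟩
    · rw [if_neg hE]
      have hG' := goodC_expand hN hG
      have hlen' : l.length + 1 ≤ f + (C ++ expandB l C).length := by
        have h1 : 1 ≤ (expandB l C).length :=
          Nat.one_le_iff_ne_zero.2 (fun h => hE (List.eq_nil_of_length_eq_zero h))
        simp only [List.length_append]
        omega
      exact ih _ hG' hlen'

theorem closeGo_spec (l : List (Nat × Nat)) (hN : l.Nodup) (r : Nat × Nat) (hr : r ∈ l) :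
    (closeGo l.length l [r]).Nodup ∧ r ∈ closeGo l.length l [r] ∧
    (∀ q, q ∈ closeGo l.length l [r] ↔ (q ∈ l ∧ ConnL l r q)) := by
  have hG0 : GoodC l r [r] := by
    refine ⟨List.nodup_singleton r, List.mem_singleton.2 rfl, ?_⟩
    intro q hq
    rw [List.mem_singleton] at hq
    subst hq
    exact ⟨hr, Relation.ReflTransGen.refl⟩
  have h := closeGo_stab l hN r l.length [r] hG0 (by simp)
  refine ⟨h.2.1, h.2.2.1, ?_⟩
  intro q
  constructor
  · exact h.2.2.2 q
  · rintro ⟨hql, hconn⟩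
    exact expand_nil_complete h.1 h.2.2.1 q hconn

theorem reach_iff_conn {b V : List (List Bool)} {l : List (Nat × Nat)} {r q : Nat × Nat}
    (hV : ∀ q, pvCell V q = false) (hl : ∀ q, q ∈ l ↔ pvCell b q = true) :
    Reach b V r q ↔ ConnL l r q := by
  constructor
  · exact Relation.ReflTransGen.mono (fun a c hc => ⟨(hl c).2 hc.1, hc.2.2⟩)
  · exact Relation.ReflTransGen.mono (fun a c hc => ⟨(hl c).1 hc.1, hV c, hc.2⟩)

theorem bLoop_acc (l : List (Nat × Nat)) (k : Nat) : bLoop l k = bLoop l 0 + k := by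
  have key : ∀ n (l : List (Nat × Nat)), l.length ≤ n → ∀ k, bLoop l k = bLoop l 0 + k := by
    intro n
    induction n with
    | zero =>
      intro l hl k
      have : l = [] := List.eq_nil_of_length_eq_zero (Nat.le_zero.1 hl)
      subst this
      simp [bLoop]
    | succ n ih =>
      intro l hl k
      match l with
      | [] => simp [bLoop]
      | r :: rest =>
        simp only [bLoop]
        have hlt : (List.filter
            (fun q => !(closeGo (r :: rest).length (r :: rest) [r]).contains q)
            (r :: rest)).length < (r :: rest).length := by
          refine pv_filter_length_lt (List.mem_cons_self ..) ?_
          simp [mem_closeGo_of_mem _ _ _ _ (List.mem_cons_self ..)]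
        have hle : (List.filter
            (fun q => !(closeGo (r :: rest).length (r :: rest) [r]).contains q)
            (r :: rest)).length ≤ n :=
          Nat.lt_succ_iff.1 (lt_of_lt_of_le hlt hl)
        rw [ih _ hle (k + 1), ih _ hle (0 + 1)]
        omega
  exact key l.length l le_rfl k

-- ---- main parallel induction ----

theorem pv_length_filter_partition (l : List (Nat × Nat)) (p : Nat × Nat → Bool) :
    l.length = (l.filter p).length + (l.filter (fun a => !p a)).length := by
  induction l with
  | nil => rfl
  | cons a t ih =>
    cases h : p a <;> simp [List.filter_cons, h, ih] <;> omega

theorem main_lemma : ∀ (P : List (Nat × Nat)) (b : List (List Bool)) (count : Int),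
    (∃ P₀, allPos b = P₀ ++ P ∧ ∀ c ∈ P₀, pvCell b c = false) →
    (P.foldl posStep (count, b)).1
      = count + ((rooksOf b).length : Int) - (bLoop (rooksOf b) 0 : Int) := by
  intro P
  induction P with
  | nil =>
    intro b count h
    obtain ⟨P₀, hP, hF⟩ := h
    have hr : rooksOf b = [] := by
      rw [rooksOf_eq_filter]
      refine List.filter_eq_nil_iff.2 ?_
      intro q hq
      rw [hP, List.append_nil] at hq
      simp [hF q hq]
    simp [hr, bLoop]
  | cons c P' ih =>
    intro b count h
    obtain ⟨P₀, hP, hF⟩ := h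
    rw [List.foldl_cons]
    by_cases hc : pvCell b c = true
    · set V0 := b.map (fun row => row.map (fun _ => false)) with hV0def
      have hV0c : ∀ q, pvCell V0 q = false := cell_fresh b
      have hsh0 : ShapeEq V0 b := shapeEq_fresh b
      have hfuel : pvCells b < (pvCells b + 1) + trues V0 := by omega
      set r := dfsA (pvCells b + 1) b c.2 c.1 V0 with hrdef
      have spec := dfsA_spec (pvCells b + 1) b c.2 c.1 V0 hc (hV0c c) hsh0 hfuel
      rw [← hrdef] at spec
      obtain ⟨sinv, scount, strues, sclosed⟩ := spec
      have hchar := dfsA_char (pvCells b + 1) b c.2 c.1 V0 hc (hV0c c) hsh0 hfuel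
      rw [← hrdef] at hchar
      have hrl : c ∈ rooksOf b := mem_rooksOf.2 hc
      obtain ⟨hCnd, hrC, hCmem⟩ := closeGo_spec (rooksOf b) (nodup_rooksOf b) c hrl
      set C := closeGo (rooksOf b).length (rooksOf b) [c] with hCdef
      have hml : ∀ d, d ∈ rooksOf b ↔ pvCell b d = true := fun d => mem_rooksOf
      have hmark : ∀ q, pvCell r.2 q = true ↔ q ∈ C := by
        intro q
        rw [hchar q]
        constructor
        · rintro (h | h)
          · rw [hV0c q] at h; cases h
          · refine (hCmem q).2 ⟨?_, (reach_iff_conn hV0c hml).1 h⟩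
            rcases reach_rook h with h1 | h1
            · rw [h1]; exact hrl
            · exact mem_rooksOf.2 h1
        · intro hqC
          exact Or.inr ((reach_iff_conn hV0c hml).2 ((hCmem q).1 hqC).2)
      have hrn : r.1 = ((C.length : Nat) : Int) := by
        have h0 : trues V0 = 0 := trues_fresh b
        have h1 : r.1 = ((trues r.2 : Nat) : Int) := by omega
        have h2 : trues r.2 = C.length := by
          unfold trues
          rw [allPos_shapeEq sinv.shape]
          apply length_eq_of_nodup_mem ((nodup_allPos b).filter _) hCnd
          intro a
          simp only [List.mem_filter]
          constructor
          · rintro ⟨-, ha⟩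
            exact (hmark a).1 ha
          · intro ha
            have hcell : pvCell r.2 a = true := (hmark a).2 ha
            exact ⟨mem_allPos.2 ((inShape_shapeEq sinv.shape a).1 (cell_inShape hcell)), hcell⟩
        rw [h1, h2]
      set b' := clearA b r.2 with hbdef
      have hshb' : ShapeEq b' b := shapeEq_clearA b r.2
      have hcontains : ∀ a, pvCell r.2 a = C.contains a := by
        intro a
        cases hra : pvCell r.2 a
        · cases hCa : C.contains a
          · rfl
          · exfalso
            have hmem : a ∈ C := by simpa using hCa
            rw [(hmark a).2 hmem] at hra
            cases hra
        · symm
          simpa using (hmark a).1 hra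
      have hrooks' : rooksOf b' = (rooksOf b).filter (fun q => !C.contains q) := by
        have h1 : rooksOf b' = (allPos b).filter (fun a => pvCell b a && !C.contains a) := by
          rw [hbdef, rooksOf_eq_filter, allPos_shapeEq (shapeEq_clearA b r.2)]
          refine List.filter_congr ?_
          intro a _
          rw [cell_clearA, hcontains a]
        have h2 : (rooksOf b).filter (fun q => !C.contains q)
            = (allPos b).filter (fun a => pvCell b a && !C.contains a) := by
          rw [rooksOf_eq_filter, List.filter_filter]
          refine List.filter_congr ?_
          intro a _
          exact Bool.and_comm _ _
        rw [h1, h2]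
      have hP'inv : ∃ P₀', allPos b' = P₀' ++ P' ∧ ∀ d ∈ P₀', pvCell b' d = false := by
        refine ⟨P₀ ++ [c], ?_, ?_⟩
        · rw [allPos_shapeEq hshb', hP]
          simp
        · intro d hd
          rw [hbdef, cell_clearA]
          rcases List.mem_append.1 hd with h | h
          · simp [hF d h]
          · rw [List.mem_singleton] at h
            subst h
            simp [(hmark d).2 hrC]
      have hps : posStep (count, b) c = (count + r.1 - 1, b') := by
        simp only [posStep]
        rw [if_pos hc, ← hV0def, ← hrdef, ← hbdef]
      rw [hps, ih b' (count + r.1 - 1) hP'inv]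
      have hl0 : rooksOf b = c :: P'.filter (fun q => pvCell b q) := by
        rw [rooksOf_eq_filter, hP, List.filter_append]
        rw [List.filter_eq_nil_iff.2 (fun d hd => by simp [hF d hd]), List.nil_append,
          List.filter_cons_of_pos (by simpa using hc)]
      have hbl : (bLoop (rooksOf b) 0 : Int) = (bLoop (rooksOf b') 0 : Int) + 1 := by
        conv_lhs => rw [hl0]
        rw [show bLoop (c :: P'.filter (fun q => pvCell b q)) 0
            = bLoop ((c :: P'.filter (fun q => pvCell b q)).filter
                (fun q => !(closeGo (c :: P'.filter (fun q => pvCell b q)).length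
                  (c :: P'.filter (fun q => pvCell b q)) [c]).contains q)) (0 + 1) from by
          simp only [bLoop]]
        rw [← hl0, ← hCdef, ← hrooks', bLoop_acc]
        push_cast
        ring
      have hlenq : ((rooksOf b).length : Int) = (C.length : Int) + ((rooksOf b').length : Int) := by
        have hpart := pv_length_filter_partition (rooksOf b) (fun q => C.contains q)
        have hfc : ((rooksOf b).filter (fun q => C.contains q)).length = C.length := by
          apply length_eq_of_nodup_mem ((nodup_rooksOf b).filter _) hCnd
          intro a
          simp only [List.mem_filter]
          constructor
          · rintro ⟨-, hca⟩
            simpa using hca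
          · intro ha
            exact ⟨((hCmem a).1 ha).1, by simpa using ha⟩
        have hrl' : (rooksOf b').length
            = ((rooksOf b).filter (fun q => !C.contains q)).length := by
          rw [hrooks']
        omega
      rw [hbl, hlenq, hrn]
      ring
    · have hps : posStep (count, b) c = (count, b) := by
        simp only [posStep]
        rw [if_neg hc]
      rw [hps]
      refine ih b count ⟨P₀ ++ [c], ?_, ?_⟩
      · rw [hP]; simp
      · intro d hd
        rcases List.mem_append.1 hd with h | h
        · exact hF d h
        · rw [List.mem_singleton] at h
          subst h
          simpa using hc

-- ===== VERDICT (by name: the statement is the Claim_ definition above) =====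
theorem find_max_moves_spec : Claim_equal_find_max_moves := by
  intro board _ _
  unfold Spec_find_max_moves find_max_moves_alt
  rw [find_max_moves_eq_flat]
  rw [main_lemma (allPos board) board 0 ⟨[], by simp⟩]
  ring
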